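-- pv_equiv track=rewrite | github.com/MGXRace/website | racesow/utils.py | strip_color_tokens
-- ===== SOURCE A (Python) =====
-- def strip_color_tokens(msg):
--     result = ""
--     i = 0
--     while i < len(msg):
--         if msg[i] == "^" and i + 1 < len(msg):
--             if msg[i + 1].isdigit():
--                 i += 2
--                 continue
--             elif msg[i + 1] == "^":
--                 i += 1
--
--         result += msg[i]
--         i += 1
--     return result
-- ===== SOURCE B (Python) =====
-- import re
--
-- def strip_color_tokens(msg):
--     def repl(m):
--         c = m.group(1)
--         if c.isdigit():
--             return ""
--         if c == "^":
--             return "^"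
--         return m.group(0)
--     return re.sub(r"\^(.)", repl, msg)
-- ===== Notes on version B (the rewrite author's own statement) =====
-- stated objective: idiomatic
-- what changed: Replaces the manual index loop with quadratic string concatenation by a single linear re.sub over pattern \^(.) whose callback drops ^digit, collapses ^^ to ^ and keeps any other match; a lone trailing ^ or ^ before a newline never matches and is preserved, as in A.
import Mathlib
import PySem

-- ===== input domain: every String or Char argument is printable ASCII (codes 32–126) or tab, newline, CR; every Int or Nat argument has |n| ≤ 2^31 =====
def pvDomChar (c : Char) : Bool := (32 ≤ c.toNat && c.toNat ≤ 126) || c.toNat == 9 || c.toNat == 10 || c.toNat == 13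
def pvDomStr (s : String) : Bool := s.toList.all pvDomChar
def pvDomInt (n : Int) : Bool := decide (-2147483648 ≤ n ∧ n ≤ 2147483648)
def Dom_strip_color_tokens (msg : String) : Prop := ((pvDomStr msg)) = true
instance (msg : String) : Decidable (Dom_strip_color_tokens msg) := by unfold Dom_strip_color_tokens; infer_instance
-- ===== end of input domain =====

-- B replaces A's manual index loop by a single regex pass (re.sub of \^(.) with a callback); return values proved equal on all inputs.

-- ===== PORT A =====
-- A's while-loop over the index i, accumulating `result`; i advances by 2 after a
-- consumed token (or via the elif that first bumps i onto the second '^').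
def stripALoop (cs : List Char) (i : Nat) (result : List Char) : List Char :=
  if h : i < cs.length then
    if h2 : cs[i] = '^' ∧ i + 1 < cs.length then
      if PySem.Chars.isdigit cs[i+1] then
        stripALoop cs (i+2) result
      else if cs[i+1] = '^' then
        -- elif: i += 1, then result += msg[i]; i += 1
        stripALoop cs (i+2) (result ++ [cs[i+1]])
      else
        stripALoop cs (i+1) (result ++ [cs[i]])
    else
      stripALoop cs (i+1) (result ++ [cs[i]])
  else result
termination_by cs.length - i

def strip_color_tokens (msg : String) : String :=
  String.mk (stripALoop msg.toList 0 [])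

-- ===== PORT B =====
-- re.sub(r"\^(.)", repl, msg): scan for a '^' followed by one character that is not
-- '\n' ('.' does not match newline); the callback drops "^<digit>", turns "^^" into
-- "^" and keeps any other match unchanged; unmatched characters are copied.
def stripBSub : List Char → List Char
  | '^' :: c :: rest =>
      if c ≠ '\n' then
        (if PySem.Chars.isdigit c then [] else if c = '^' then ['^'] else ['^', c]) ++ stripBSub rest
      else '^' :: stripBSub (c :: rest)
  | c :: rest => c :: stripBSub rest
  | [] => []

def strip_color_tokens_alt (msg : String) : String :=
  String.mk (stripBSub msg.toList)

-- ===== PRECONDITION & SPEC =====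
def Spec_strip_color_tokens (msg : String) (out : String) : Prop := out = strip_color_tokens_alt msg
instance (msg : String) (out : String) : Decidable (Spec_strip_color_tokens msg out) := by unfold Spec_strip_color_tokens; infer_instance

-- ===== CLAIM (what is proved, stated in full; the proofs are below) =====
def Claim_equal_strip_color_tokens : Prop := ∀ (msg : String), Dom_strip_color_tokens msg → Spec_strip_color_tokens msg (strip_color_tokens msg)

-- ===== LEMMAS AND PROOFS =====

-- A digit character is not a newline.
theorem isdigit_ne_newline (c : Char) (h : PySem.Chars.isdigit c = true) : c ≠ '\n' := by
  intro hc; subst hc; simp [PySem.Chars.isdigit] at h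

-- Characters other than a non-final "^<non-newline>" head are copied verbatim by B.
theorem stripBSub_cons_of_not_caret (c : Char) (t : List Char)
    (h : c ≠ '^' ∨ t = []) : stripBSub (c :: t) = c :: stripBSub t := by
  cases t with
  | nil => cases c; simp [stripBSub]
  | cons d t' =>
    rcases h with hc | hc
    · -- c ≠ '^'
      cases c
      cases d <;> simp_all [stripBSub]
    · exact absurd hc (by simp)

-- Unfolding B's scan on a matched "^<non-newline>" pair.
theorem stripBSub_caret_cons (c : Char) (t : List Char) (hnl : c ≠ '\n') :
    stripBSub ('^' :: c :: t) =
      (if PySem.Chars.isdigit c then [] else if c = '^' then ['^'] else ['^', c]) ++ stripBSub t := by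
  simp [stripBSub, hnl]

-- Loop invariant: A's loop from index i equals `result` followed by B's pass on the suffix.
theorem stripALoop_eq (cs : List Char) (i : Nat) (result : List Char) :
    stripALoop cs i result = result ++ stripBSub (cs.drop i) := by
  rw [stripALoop]
  split
  · next h =>
    have hdrop : cs.drop i = cs[i] :: cs.drop (i+1) := List.drop_eq_getElem_cons h
    split
    · next h2 =>
      obtain ⟨hcaret, hlt⟩ := h2
      have hdrop2 : cs.drop (i+1) = cs[i+1]'hlt :: cs.drop (i+2) :=
        List.drop_eq_getElem_cons hlt
      have hdd : cs.drop i = '^' :: cs[i+1]'hlt :: cs.drop (i+2) := by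
        rw [hdrop, hcaret, hdrop2]
      split
      · next hd =>
        rw [stripALoop_eq cs (i+2) result, hdd,
          stripBSub_caret_cons _ _ (isdigit_ne_newline _ hd), hd]
        simp
      · split
        · next hnd hc =>
          rw [stripALoop_eq cs (i+2) (result ++ [cs[i+1]'hlt]), hdd,
            stripBSub_caret_cons _ _ (by rw [hc]; decide), hc,
            show PySem.Chars.isdigit '^' = false from by decide]
          simp
        · next hnd hc =>
          rw [stripALoop_eq cs (i+1) (result ++ [cs[i]]), hdrop, hcaret]
          by_cases hnl : cs[i+1]'hlt = '\n'
          · simp [stripBSub, hdrop2, hnl]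
          · rw [hdrop2, stripBSub_caret_cons _ _ hnl,
              stripBSub_cons_of_not_caret _ _ (Or.inl hc)]
            simp [hnd, hc]
    · next h2 =>
      rw [stripALoop_eq cs (i+1) (result ++ [cs[i]]), hdrop]
      rcases Decidable.em (cs[i] = '^') with hc | hc
      · have hlen : ¬ i + 1 < cs.length := fun hl => h2 ⟨hc, hl⟩
        rw [stripBSub_cons_of_not_caret _ _ (Or.inr (List.drop_eq_nil_of_le (by omega)))]
        simp
      · rw [stripBSub_cons_of_not_caret _ _ (Or.inl hc)]
        simp
  · next h =>
    rw [List.drop_eq_nil_of_le (by omega)]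
    simp [stripBSub]
termination_by cs.length - i

theorem main_eq (msg : String) : strip_color_tokens msg = strip_color_tokens_alt msg := by
  unfold strip_color_tokens strip_color_tokens_alt
  rw [stripALoop_eq msg.toList 0 []]
  simp

-- ===== VERDICT (by name: the statement is the Claim_ definition above) =====
theorem strip_color_tokens_spec : Claim_equal_strip_color_tokens := by
  intro msg _
  unfold Spec_strip_color_tokens
  exact main_eq msg
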